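-- pv_equiv track=rewrite | github.com/sroccaserra/aoc2023 | 12.py | compact_left
-- ===== SOURCE A (Python) =====
-- def compact_left(s, ns):
--     start, end = 0, 0
--
--     result = ''
--     for n in ns:
--         while True:
--             c = s[end]
--             if c in '?#':
--                 end += 1
--             else:
--                 start += 1
--                 end = start
--             if n <= abs(end - start):
--                 end += 1
--                 start = end
--                 break
--
--     return end
-- ===== SOURCE B (Python) =====
-- def compact_left(s, ns):
--     # Pass 1: run-length table; run[j] = length of the run of '?#' chars ending at j.
--     run = []
--     r = 0
--     for c in s:
--         r = r + 1 if c in '?#' else 0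
--         run.append(r)
--     # Pass 2: for each group, scan the table for the first window of n '?#' chars
--     # fitting at or after i (run[j] >= n and the window does not start before i).
--     i = 0
--     for n in ns:
--         j = i
--         while run[j] < n or j - n + 1 < i:
--             j += 1
--         i = j + 2
--     return i
-- ===== Notes on version B (the rewrite author's own statement) =====
-- stated objective: faster
-- what changed: A rescans with a rewinding cursor (on a non-'?#' char it resets end = start and re-reads the current run); B first builds a run-length table in one pass over the string and then, per group, searches that table for the first window of n consecutive '?#' chars not starting before the cursor, so each character of s is read exactly once.
import Mathlib
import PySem

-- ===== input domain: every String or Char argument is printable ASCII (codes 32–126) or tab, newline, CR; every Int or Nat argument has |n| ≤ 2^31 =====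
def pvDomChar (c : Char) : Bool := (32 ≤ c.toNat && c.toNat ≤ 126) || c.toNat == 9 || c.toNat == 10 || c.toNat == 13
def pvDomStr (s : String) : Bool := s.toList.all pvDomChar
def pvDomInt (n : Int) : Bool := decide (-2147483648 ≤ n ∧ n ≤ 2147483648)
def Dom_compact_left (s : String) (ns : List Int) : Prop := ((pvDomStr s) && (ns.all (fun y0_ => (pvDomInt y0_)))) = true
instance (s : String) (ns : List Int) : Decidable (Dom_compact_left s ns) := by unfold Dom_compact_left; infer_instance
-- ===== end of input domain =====

-- B replaces A's rewinding rescan (end = start reset) by a precomputed run-length table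
-- plus a per-group window search over that table (objective: faster, one read per char).

-- ===== PORT A =====
-- c in '?#'
def pvGood (c : Char) : Bool := c = '?' || c = '#'

-- A's inner 'while True', state (start, end) kept as (start, cnt) with end = start + cnt
-- (end - start = cnt ≥ 0 throughout A's loop; abs(end-start) = cnt).  On a non-'?#' char A
-- rewinds: start += 1, end = start (cnt = 0) and rescans from start+1.  Returns the new
-- end (= start) after the break, none = IndexError.
def pvLoopA (s : List Char) (n : Int) (start cnt : Nat) : Option Nat :=
  match h : PySem.List.pyGet? s ((start + cnt : Nat) : Int) with
  | none => none            -- s[end] raises IndexError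
  | some c =>
    if pvGood c then
      if n ≤ (cnt : Int) + 1 then some (start + cnt + 2)   -- end += 1; start = end; break
      else pvLoopA s n start (cnt + 1)                     -- end += 1
    else
      if n ≤ 0 then some (start + 2)                       -- start += 1; end = start; then break
      else pvLoopA s n (start + 1) 0                       -- start += 1; end = start (rewind)
termination_by (s.length - start, s.length - cnt)
decreasing_by
  all_goals
    rw [PySem.List.pyGet?_natCast] at h
    have hlt := (List.getElem?_eq_some_iff.mp h).1
  · exact Prod.Lex.right _ (by omega)
  · exact Prod.Lex.left _ _ (by omega)

def compact_left (s : String) (ns : List Int) : Int :=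
  match ns.foldl (fun acc n => acc.bind fun st => pvLoopA s.toList n st 0) (some (0 : Nat)) with
  | some e => (e : Int)
  | none => 0               -- unreachable under Pre_compact_left (Python raises IndexError)

-- ===== PORT B =====
-- Pass 1 of Source B: the run-length table; entry j is the length of the run of '?#'
-- characters ending at position j (the append loop, as structural recursion on s with
-- the running value r as accumulator).
def pvRuns : List Char → Nat → List Nat
  | [], _ => []
  | c :: t, r =>
    let r' := if pvGood c then r + 1 else 0
    r' :: pvRuns t r'

-- Pass 2 of Source B, inner 'while': advance j until the table shows a window of n good
-- chars ending at j that does not start before i; then return j + 2.  none = IndexError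
-- (run[j] with j past the table).
def pvFind (run : List Nat) (n : Int) (i j : Nat) : Option Nat :=
  match h : PySem.List.pyGet? run ((j : Nat) : Int) with
  | none => none            -- run[j] raises IndexError
  | some r =>
    if (r : Int) < n || (j : Int) - n + 1 < (i : Int) then pvFind run n i (j + 1)
    else some (j + 2)
termination_by run.length - j
decreasing_by
  rw [PySem.List.pyGet?_natCast] at h
  have := (List.getElem?_eq_some_iff.mp h).1
  omega

def compact_left_alt (s : String) (ns : List Int) : Int :=
  let run := pvRuns s.toList 0
  match ns.foldl (fun acc n => acc.bind fun i => pvFind run n i i) (some (0 : Nat)) with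
  | some e => (e : Int)
  | none => 0               -- unreachable under Pre_compact_left

-- ===== PRECONDITION & SPEC =====
-- A raises IndexError when the greedy placement runs off the end of the string; Pre_ admits
-- exactly the inputs where every group can be placed (a list-consuming matcher: placeRun
-- consumes characters until the group fits, yielding the remainder past the separator).
def pvPlaceRun (n : Int) (cnt : Nat) : List Char → Option (List Char)
  | [] => none
  | c :: rest =>
    let cnt' := if pvGood c then cnt + 1 else 0
    if n ≤ (cnt' : Int) then some rest.tail else pvPlaceRun n cnt' rest

def pvPlaceAll : List Int → List Char → Bool
  | [], _ => true
  | n :: ns, l =>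
    match pvPlaceRun n 0 l with
    | none => false
    | some r => pvPlaceAll ns r

def Pre_compact_left (s : String) (ns : List Int) : Prop := pvPlaceAll ns s.toList = true
instance (s : String) (ns : List Int) : Decidable (Pre_compact_left s ns) := by unfold Pre_compact_left; infer_instance

def pvWitness_compact_left : String × List Int := ("#.##", [1, 2])

def Spec_compact_left (s : String) (ns : List Int) (out : Int) : Prop := out = compact_left_alt s ns
instance (s : String) (ns : List Int) (out : Int) : Decidable (Spec_compact_left s ns out) := by unfold Spec_compact_left; infer_instance

-- ===== CLAIM (what is proved, stated in full; the proofs are below) =====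
def Claim_equal_compact_left : Prop := ∀ (s : String) (ns : List Int), Dom_compact_left s ns → Pre_compact_left s ns → Spec_compact_left s ns (compact_left s ns)

-- ===== LEMMAS AND PROOFS =====

-- Proof-only bridge: a forward scan with a running count of consecutive '?#' chars.
-- A's rewinding loop equals it (pvLoop_eq below), and it equals B's table search
-- (pvFind_eq_loopB below).
def pvLoopB (s : List Char) (n : Int) (i cnt : Nat) : Option Nat :=
  match h : s[i]? with
  | none => none
  | some c =>
    let cnt' := if pvGood c then cnt + 1 else 0
    if n ≤ (cnt' : Int) then some (i + 2)
    else pvLoopB s n (i + 1) cnt'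
termination_by s.length - i
decreasing_by
  have := (List.getElem?_eq_some_iff.mp h).1; omega

-- unfolding lemma for pvLoopA (its dependent match on pyGet? restated over s[i]?)
theorem pvLoopA_eq (s : List Char) (n : Int) (start cnt : Nat) :
    pvLoopA s n start cnt =
      match s[start + cnt]? with
      | none => none
      | some c =>
        if pvGood c then
          if n ≤ (cnt : Int) + 1 then some (start + cnt + 2) else pvLoopA s n start (cnt + 1)
        else
          if n ≤ 0 then some (start + 2) else pvLoopA s n (start + 1) 0 := by
  rw [pvLoopA]
  split
  · next h =>
      have h' : s[start + cnt]? = none := (PySem.List.pyGet?_natCast ..).symm.trans h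
      simp [h']
  · next c h =>
      have h' : s[start + cnt]? = some c := (PySem.List.pyGet?_natCast ..).symm.trans h
      simp [h']

-- unfolding lemma for pvLoopB
theorem pvLoopB_eq (s : List Char) (n : Int) (i cnt : Nat) :
    pvLoopB s n i cnt =
      match s[i]? with
      | none => none
      | some c =>
        let cnt' := if pvGood c then cnt + 1 else 0
        if n ≤ (cnt' : Int) then some (i + 2)
        else pvLoopB s n (i + 1) cnt' := by
  rw [pvLoopB]
  split
  · next h => simp [h]
  · next c h => simp [h]

-- unfolding lemma for pvFind
theorem pvFind_eq (run : List Nat) (n : Int) (i j : Nat) :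
    pvFind run n i j =
      match run[j]? with
      | none => none
      | some r =>
        if (r : Int) < n || (j : Int) - n + 1 < (i : Int) then pvFind run n i (j + 1)
        else some (j + 2) := by
  rw [pvFind]
  split
  · next h =>
      have h' : run[j]? = none := (PySem.List.pyGet?_natCast ..).symm.trans h
      simp [h']
  · next r h =>
      have h' : run[j]? = some r := (PySem.List.pyGet?_natCast ..).symm.trans h
      simp [h']

-- one good-char step of A's loop
theorem pvLoopA_step_good (s : List Char) (n : Int) (start cnt : Nat) (c : Char)
    (hc : s[start + cnt]? = some c) (hgood : pvGood c = true) (hn : ¬ n ≤ (cnt : Int) + 1) :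
    pvLoopA s n start cnt = pvLoopA s n start (cnt + 1) := by
  rw [pvLoopA_eq]
  simp [hc, hgood, hn]

-- rescanning a known-good prefix just rebuilds the counter
theorem pvLoopA_rescan (s : List Char) (n : Int) (cnt : Nat) :
    ∀ start, start + cnt ≤ s.length →
    (∀ j < cnt, ∀ c, s[start + j]? = some c → pvGood c = true) →
    (cnt : Int) < n → pvLoopA s n start 0 = pvLoopA s n start cnt := by
  induction cnt with
  | zero => intro start _ _ _; rfl
  | succ k ih =>
    intro start hlen hg hn
    have hk : start + k < s.length := by omega
    have hck : s[start + k]? = some s[start + k] := List.getElem?_eq_getElem hk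
    have hgk : pvGood s[start + k] = true := hg k (by omega) _ hck
    have h1 : pvLoopA s n start 0 = pvLoopA s n start k := by
      apply ih start (by omega) (fun j hj c hc => hg j (by omega) c hc)
      push_cast at hn ⊢; omega
    rw [h1]
    exact pvLoopA_step_good s n start k _ hck hgk (by push_cast at hn ⊢; omega)

-- after a bad char at start+cnt (preceded by cnt good chars, a run too short: cnt < n),
-- A's rewinding restart from start+1 ends up exactly past the bad char
theorem pvLoopA_badskip (s : List Char) (n : Int) (cnt : Nat) :
    ∀ start c, (∀ j < cnt, ∀ c', s[start + j]? = some c' → pvGood c' = true) →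
    s[start + cnt]? = some c → pvGood c = false → (cnt : Int) < n → 0 < n →
    pvLoopA s n start 0 = pvLoopA s n (start + cnt + 1) 0 := by
  induction cnt with
  | zero =>
    intro start c _ hc hbad hn hpos
    rw [pvLoopA_eq]
    simp only [Nat.add_zero] at hc ⊢
    simp [hc, hbad, show ¬ n ≤ 0 by omega]
  | succ k ih =>
    intro start c hg hc hbad hn hpos
    have hlen : start + (k + 1) ≤ s.length := by
      have := (List.getElem?_eq_some_iff.mp hc).1; omega
    rw [pvLoopA_rescan s n (k + 1) start hlen hg hn]
    rw [pvLoopA_eq]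
    rw [hc]
    simp only [hbad, Bool.false_eq_true, if_false, if_neg (show ¬ n ≤ 0 by omega)]
    have h2 := ih (start + 1) c
      (fun j hj c' hc' => hg (j + 1) (by omega) c' (by rw [show start + 1 + j = start + (j + 1) by omega] at hc'; exact hc'))
      (by rw [show start + 1 + k = start + (k + 1) by omega]; exact hc) hbad
      (by push_cast at hn ⊢; omega) hpos
    rw [h2, show start + 1 + k + 1 = start + (k + 1) + 1 by omega]

-- A's loop at (start, cnt) equals the forward scan at index start+cnt, whenever the cnt
-- chars before the cursor are good and the run is still too short
theorem pvLoop_main (s : List Char) (n : Int) :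
    ∀ m start cnt, s.length - (start + cnt) ≤ m →
    (∀ j < cnt, ∀ c, s[start + j]? = some c → pvGood c = true) →
    (cnt = 0 ∨ (cnt : Int) < n) →
    pvLoopA s n start cnt = pvLoopB s n (start + cnt) cnt := by
  intro m
  induction m with
  | zero =>
    intro start cnt hm _ _
    have hnone : s[start + cnt]? = none := List.getElem?_eq_none (by omega)
    rw [pvLoopA_eq, pvLoopB_eq]
    simp [hnone]
  | succ m ih =>
    intro start cnt hm hg hd
    rw [pvLoopA_eq, pvLoopB_eq]
    cases hc : s[start + cnt]? with
    | none => rfl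
    | some c =>
      have hlt : start + cnt < s.length := (List.getElem?_eq_some_iff.mp hc).1
      cases hgood : pvGood c with
      | true =>
        simp only [hgood, if_true, Nat.cast_add, Nat.cast_one]
        by_cases hn : n ≤ (cnt : Int) + 1
        · simp [hn]
        · simp only [if_neg hn]
          rw [ih start (cnt + 1) (by omega)
            (by intro j hj c' hc'
                rcases Nat.lt_succ_iff_lt_or_eq.mp hj with h | h
                · exact hg j h c' hc'
                · subst h; rw [hc'] at hc; cases hc; exact hgood)
            (Or.inr (by push_cast; omega))]
          rw [show start + (cnt + 1) = start + cnt + 1 by omega]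
      | false =>
        simp only [hgood, Bool.false_eq_true, if_false, Nat.cast_zero]
        cases cnt with
        | zero =>
          by_cases hn : n ≤ (0 : Int)
          · simp [hn]
          · simp only [if_neg hn]
            rw [ih (start + 1) 0 (by omega) (by intro j hj; omega) (Or.inl rfl)]
        | succ k =>
          have hkn : ((k : Int) + 1) < n := by
            rcases hd with h | h
            · exact absurd h (by omega)
            · push_cast at h ⊢; omega
          have hnpos : ¬ n ≤ (0 : Int) := by omega
          simp only [if_neg hnpos]
          have hskip := pvLoopA_badskip s n k (start + 1) c
            (fun j hj c' hc' => hg (j + 1) (by omega) c' (by rw [show start + 1 + j = start + (j + 1) by omega] at hc'; exact hc'))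
            (by rw [show start + 1 + k = start + (k + 1) by omega]; exact hc) hgood
            (by omega) (by omega)
          rw [hskip]
          rw [ih (start + 1 + k + 1) 0 (by omega) (by intro j hj; omega) (Or.inl rfl)]
          rw [show start + 1 + k + 1 + 0 = start + (k + 1) + 1 by omega]

theorem pvLoop_eq (s : List Char) (n : Int) (start : Nat) :
    pvLoopA s n start 0 = pvLoopB s n start 0 := by
  have := pvLoop_main s n (s.length - start) start 0 (by omega) (by intro j hj; omega) (Or.inl rfl)
  simpa using this

-- the run table has one entry per character
theorem pvRuns_length (s : List Char) : ∀ r, (pvRuns s r).length = s.length := by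
  induction s with
  | nil => intro r; rfl
  | cons c t ih => intro r; simp [pvRuns, ih]

-- the run value at position j (0 past the end); r is the running value carried in
def pvFullR (s : List Char) (r j : Nat) : Nat := ((pvRuns s r)[j]?).getD 0

theorem pvFullR_get (s : List Char) (r j : Nat) (h : j < s.length) :
    (pvRuns s r)[j]? = some (pvFullR s r j) := by
  have hl : j < (pvRuns s r).length := by rw [pvRuns_length]; exact h
  rw [pvFullR, List.getElem?_eq_getElem hl]
  rfl

-- recurrence of the run table: each entry extends the previous one on a good char
theorem pvFullR_rec (s : List Char) :
    ∀ r j c, s[j]? = some c →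
    pvFullR s r j = if pvGood c then (if j = 0 then r else pvFullR s r (j - 1)) + 1 else 0 := by
  induction s with
  | nil => intro r j c hc; simp at hc
  | cons d t ih =>
    intro r j c hc
    cases j with
    | zero =>
      simp only [List.getElem?_cons_zero, Option.some.injEq] at hc
      subst hc
      simp [pvFullR, pvRuns]
    | succ k =>
      simp only [List.getElem?_cons_succ] at hc
      have hstep : ∀ m, pvFullR (d :: t) r (m + 1) = pvFullR t (if pvGood d then r + 1 else 0) m := by
        intro m; simp [pvFullR, pvRuns]
      rw [hstep k, ih _ k c hc]
      cases k with
      | zero => simp [pvFullR, pvRuns]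
      | succ l => simp [hstep l]

-- B's table search equals the forward scan: the running count entering index j is the
-- run ending at j-1 truncated to start no earlier than i
theorem pvFind_main (s : List Char) (n : Int) (i : Nat) :
    ∀ m j (cnt : Nat), s.length - j ≤ m → i ≤ j →
    (cnt : Int) = min (if j = 0 then 0 else (pvFullR s 0 (j - 1) : Int)) ((j : Int) - (i : Int)) →
    pvFind (pvRuns s 0) n i j = pvLoopB s n j cnt := by
  intro m
  induction m with
  | zero =>
    intro j cnt hm _ _
    have hs : s[j]? = none := List.getElem?_eq_none (by omega)
    have hr : (pvRuns s 0)[j]? = none := List.getElem?_eq_none (by rw [pvRuns_length]; omega)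
    rw [pvFind_eq, pvLoopB_eq]
    simp [hs, hr]
  | succ m ih =>
    intro j cnt hm hij hinv
    rw [pvFind_eq, pvLoopB_eq]
    cases hs : s[j]? with
    | none =>
      have hr : (pvRuns s 0)[j]? = none :=
        List.getElem?_eq_none (by rw [pvRuns_length]; exact List.getElem?_eq_none_iff.mp hs)
      simp [hr]
    | some c =>
      have hlt : j < s.length := (List.getElem?_eq_some_iff.mp hs).1
      rw [pvFullR_get s 0 j hlt]
      have hrec := pvFullR_rec s 0 j c hs
      -- the new count equals the truncated run ending at j
      have hcnt' : ((if pvGood c then cnt + 1 else 0 : Nat) : Int)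
          = min ((pvFullR s 0 j : Int)) ((j : Int) - (i : Int) + 1) := by
        cases hgood : pvGood c with
        | true =>
          rw [hgood, if_pos rfl] at hrec
          cases hj : j with
          | zero =>
            subst hj
            have hi0 : i = 0 := by omega
            subst hi0
            rw [hrec]
            simp only [if_true]
            push_cast
            push_cast at hinv
            omega
          | succ k =>
            subst hj
            simp only [Nat.succ_ne_zero, if_false, Nat.add_sub_cancel] at hrec hinv
            rw [hrec]
            simp only [if_true]
            push_cast
            push_cast at hinv
            omega
        | false =>
          rw [hgood, if_neg (by simp)] at hrec
          rw [hrec]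
          simp only [Bool.false_eq_true, if_false]
          push_cast
          omega
      have hmin : ((if (pvFullR s 0 j : Int) < n ∨ (j : Int) - n + 1 < (i : Int) then True else False)) ↔
          ¬ n ≤ ((if pvGood c then cnt + 1 else 0 : Nat) : Int) := by
        rw [hcnt']
        constructor
        · intro h; split at h
          · next hcond => omega
          · exact absurd h (by simp)
        · intro h
          have : (pvFullR s 0 j : Int) < n ∨ (j : Int) - n + 1 < (i : Int) := by omega
          simp [this]
      by_cases hstop : (pvFullR s 0 j : Int) < n ∨ (j : Int) - n + 1 < (i : Int)
      · -- continue scanning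
        have hn : ¬ n ≤ ((if pvGood c then cnt + 1 else 0 : Nat) : Int) :=
          hmin.mp (by simp [hstop])
        simp only [if_pos (by simpa using hstop : ((pvFullR s 0 j : Int) < n || (j : Int) - n + 1 < (i : Int)) = true)]
        rw [if_neg (by push_cast at hn ⊢; exact hn)]
        apply ih (j + 1) _ (by omega) (by omega)
        simp only [Nat.succ_ne_zero, if_false, Nat.add_sub_cancel]
        rw [hcnt']
        push_cast
        omega
      · -- stop: both return j + 2
        have hn : n ≤ ((if pvGood c then cnt + 1 else 0 : Nat) : Int) := by
          by_contra hh
          exact hstop (by omega)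
        simp only [if_neg (by simpa using hstop : ¬ ((pvFullR s 0 j : Int) < n || (j : Int) - n + 1 < (i : Int)) = true)]
        rw [if_pos (by push_cast at hn ⊢; exact hn)]

theorem pvFind_eq_loopB (s : List Char) (n : Int) (i : Nat) :
    pvFind (pvRuns s 0) n i i = pvLoopB s n i 0 := by
  apply pvFind_main s n i (s.length - i) i 0 (by omega) (le_refl i)
  cases i with
  | zero => simp
  | succ k =>
    simp only [Nat.succ_ne_zero, if_false]
    have : (0 : Int) ≤ (pvFullR s 0 (k + 1 - 1) : Int) := by positivity
    push_cast
    omega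

theorem pvFold_none (f : Int → Nat → Option Nat) (ns : List Int) :
    ns.foldl (fun acc n => acc.bind fun st => f n st) none = none := by
  induction ns with
  | nil => rfl
  | cons n ns ih => simpa using ih

theorem pvFold_eq (s : List Char) (ns : List Int) :
    ∀ st, ns.foldl (fun acc n => acc.bind fun st => pvLoopA s n st 0) (some st)
        = ns.foldl (fun acc n => acc.bind fun i => pvFind (pvRuns s 0) n i i) (some st) := by
  induction ns with
  | nil => intro st; rfl
  | cons n ns ih =>
    intro st
    simp only [List.foldl_cons, Option.bind_some]
    rw [pvLoop_eq s n st, ← pvFind_eq_loopB s n st]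
    cases h : pvFind (pvRuns s 0) n st st with
    | none =>
      rw [pvFold_none (fun n st => pvLoopA s n st 0), pvFold_none (fun n i => pvFind (pvRuns s 0) n i i)]
    | some st' => exact ih st'

-- ===== VERDICT (by name: the statement is the Claim_ definition above) =====
theorem compact_left_spec : Claim_equal_compact_left := by
  intro s ns _ _
  unfold Spec_compact_left compact_left compact_left_alt
  rw [pvFold_eq]
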